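-- pv_equiv track=rewrite | github.com/someng2/CodingPractice | Python/vowel_dictionary.py | solution
-- ===== SOURCE A (Python) =====
-- def solution(word):
--     answer = 0
--     dic = {'A':0, 'E':1, 'I':2, 'O':3, 'U':4}
--     li = [5**i for i in range(5)]
--
--     for i in range(len(word)-1,-1,-1):
--         idx = dic[word[i]]
--         for j in range(5-i):
--             answer += li[j]*idx
--         answer+=1
--     return answer
-- ===== SOURCE B (Python) =====
-- def solution(word):
--     dic = {'A': 0, 'E': 1, 'I': 2, 'O': 3, 'U': 4}
--     # P[m] = sum of the first m powers of 5, precomputed once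
--     P = [0, 1, 6, 31, 156, 781]
--     return sum(dic[c] * P[max(0, 5 - i)] + 1 for i, c in enumerate(word))
-- ===== Notes on version B (the rewrite author's own statement) =====
-- stated objective: simpler
-- what changed: Replaces the reversed index loop with an inner re-summing loop of powers of 5 by a single enumerate pass that looks the inner sum up in a precomputed prefix-sum table P=[0,1,6,31,156,781] and feeds the terms to sum().
import Mathlib
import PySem

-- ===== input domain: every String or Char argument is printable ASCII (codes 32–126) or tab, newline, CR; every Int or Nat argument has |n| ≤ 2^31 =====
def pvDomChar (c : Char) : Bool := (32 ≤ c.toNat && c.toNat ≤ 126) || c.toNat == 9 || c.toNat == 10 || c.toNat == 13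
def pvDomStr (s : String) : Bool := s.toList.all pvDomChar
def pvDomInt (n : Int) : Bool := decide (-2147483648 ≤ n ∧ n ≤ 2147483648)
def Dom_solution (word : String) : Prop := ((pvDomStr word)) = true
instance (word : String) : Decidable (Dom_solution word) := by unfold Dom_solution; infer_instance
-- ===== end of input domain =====

-- B replaces A's reversed loop with an inner re-summing loop by one enumerate pass over a precomputed prefix-sum table (simpler).

-- ===== PORT A =====
-- the vowel dict of A's source (shared literal; B's source builds the same dict)
def pvDic : PySem.Dict Char Int :=
  PySem.Dict.ofList [('A', 0), ('E', 1), ('I', 2), ('O', 3), ('U', 4)]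

def solution (word : String) : Int :=
  let cs := word.toList
  let li : List Int := (PySem.List.pyRange 0 5 1).map (fun i => (5 : Int) ^ i.toNat)
  (PySem.List.pyRange ((cs.length : Int) - 1) (-1) (-1)).foldl
    (fun answer i =>
      -- dic[word[i]]: KeyError on a non-vowel char is excluded by Pre_solution
      let idx := pvDic.getD (PySem.List.pyGetD cs i 'A') 0
      ((PySem.List.pyRange 0 (5 - i) 1).foldl
        (fun a j => a + PySem.List.pyGetD li j 0 * idx) answer) + 1)
    0

-- ===== PORT B =====
def solution_alt (word : String) : Int :=
  let P : List Int := [0, 1, 6, 31, 156, 781]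
  (PySem.List.enumerate word.toList 0).foldl
    (fun acc p => acc + pvDic.getD p.2 0 * PySem.List.pyGetD P (max 0 (5 - p.1)) 0 + 1) 0

-- ===== PRECONDITION & SPEC =====
-- Pre_ excludes words containing a character other than A,E,I,O,U: there A (and B) raise KeyError.
def Pre_solution (word : String) : Prop :=
  (word.toList.all (fun c => c == 'A' || c == 'E' || c == 'I' || c == 'O' || c == 'U')) = true
instance (word : String) : Decidable (Pre_solution word) := by unfold Pre_solution; infer_instance
def pvWitness_solution : String := "AE"

def Spec_solution (word : String) (out : Int) : Prop := out = solution_alt word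
instance (word : String) (out : Int) : Decidable (Spec_solution word out) := by unfold Spec_solution; infer_instance

-- ===== CLAIM (what is proved, stated in full; the proofs are below) =====
def Claim_equal_solution : Prop := ∀ (word : String), Dom_solution word → Pre_solution word → Spec_solution word (solution word)

-- ===== LEMMAS AND PROOFS =====

-- the per-index term both programs add for index i of the word
def pvTerm (cs : List Char) (i : Int) : Int :=
  pvDic.getD (PySem.List.pyGetD cs i 'A') 0 *
    PySem.List.pyGetD [0, 1, 6, 31, 156, 781] (max 0 (5 - i)) 0 + 1

def pvSumN (cs : List Char) : Int :=
  ((List.range cs.length).map (fun k : Nat => pvTerm cs (k : Int))).sum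

-- a fold that only adds per-element terms is the sum of those terms
lemma pvFoldl_sum {beta : Type} (l : List beta) (f : Int → beta → Int) (g : beta → Int) (a : Int)
    (h : ∀ acc x, x ∈ l → f acc x = acc + g x) : l.foldl f a = a + (l.map g).sum := by
  induction l generalizing a with
  | nil => simp
  | cons x t ih =>
    have ht : ∀ acc y, y ∈ t → f acc y = acc + g y :=
      fun acc y hy => h acc y (List.mem_cons_of_mem _ hy)
    simp only [List.foldl_cons, List.map_cons, List.sum_cons]
    rw [h a x (by simp), ih _ ht]
    ring

-- A's inner loop over j in range(5-i): idx times the prefix sum of the first max(0,5-i) powers of 5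
lemma pvInner_eq (i : Int) (hi : 0 ≤ i) (idx : Int) (acc : Int) :
    (PySem.List.pyRange 0 (5 - i) 1).foldl
      (fun a j => a + PySem.List.pyGetD ((PySem.List.pyRange 0 5 1).map (fun k => (5 : Int) ^ k.toNat)) j 0 * idx) acc
      = acc + idx * PySem.List.pyGetD [0, 1, 6, 31, 156, 781] (max 0 (5 - i)) 0 := by
  have hli : (PySem.List.pyRange 0 5 1).map (fun k => (5 : Int) ^ k.toNat) = [1, 5, 25, 125, 625] := by decide
  rw [hli]
  by_cases h5 : 5 ≤ i
  · rw [PySem.List.pyRange_one_eq_nil (show (5 : Int) - i ≤ 0 by omega)]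
    have hm : max 0 (5 - i) = 0 := by omega
    rw [hm]
    simp [PySem.List.pyGetD, PySem.List.pyGet?, PySem.List.pyIdx?]
  · have h4 : i ≤ 4 := by omega
    interval_cases i <;>
      simp [show PySem.List.pyRange 0 5 1 = [0, 1, 2, 3, 4] from by decide,
            show PySem.List.pyRange 0 4 1 = [0, 1, 2, 3] from by decide,
            show PySem.List.pyRange 0 3 1 = [0, 1, 2] from by decide,
            show PySem.List.pyRange 0 2 1 = [0, 1] from by decide,
            show PySem.List.pyRange 0 1 1 = [0] from by decide,
            List.foldl, PySem.List.pyGetD, PySem.List.pyGet?, PySem.List.pyIdx?] <;> ring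

-- reversing the index order does not change the sum
lemma pvSum_range_rev (F : Int → Int) (n : Nat) :
    ((List.range n).map (fun k : Nat => F ((n : Int) - 1 - (k : Int)))).sum
      = ((List.range n).map (fun k : Nat => F (k : Int))).sum := by
  induction n with
  | zero => simp
  | succ m ih =>
    conv_lhs => rw [List.range_succ_eq_map]
    rw [List.range_succ]
    simp only [List.map_cons, List.sum_cons, List.map_map, List.map_append, List.sum_append,
      List.map_nil, List.sum_nil]
    have h2 : ((List.range m).map ((fun k : Nat => F (((m + 1 : Nat) : Int) - 1 - (k : Int))) ∘ Nat.succ)).sum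
        = ((List.range m).map (fun k : Nat => F ((m : Int) - 1 - (k : Int)))).sum := by
      apply congrArg
      apply List.map_congr_left
      intro k _
      simp only [Function.comp]
      congr 1
      push_cast
      ring
    rw [h2, ih]
    have h1 : (((m + 1 : Nat) : Int) - 1 - ((0 : Nat) : Int)) = (m : Int) := by push_cast; ring
    rw [h1]
    ring

-- A computes the sum of pvTerm over the indices of the word (visited right to left)
lemma pvA_eq_sum (word : String) : solution word = pvSumN word.toList := by
  unfold solution
  dsimp only []
  rw [PySem.List.pyRange_neg_one, List.foldl_map]
  have hn : (((word.toList.length : Int)) - 1 - (-1)).toNat = word.toList.length := by omega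
  rw [hn]
  rw [pvFoldl_sum (List.range word.toList.length) _
      (fun k : Nat => pvTerm word.toList ((word.toList.length : Int) - 1 - (k : Int))) 0
      (by
        intro acc k hk
        simp only [List.mem_range] at hk
        rw [pvInner_eq ((word.toList.length : Int) - 1 - (k : Int)) (by omega)]
        unfold pvTerm
        ring)]
  rw [zero_add, pvSum_range_rev (pvTerm word.toList) word.toList.length]
  rfl

-- B computes the same sum, one table lookup per index
lemma pvB_eq_sum (word : String) : solution_alt word = pvSumN word.toList := by
  unfold solution_alt
  dsimp only []
  rw [PySem.List.enumerate_eq_map_pyRange (d := 'A'), List.foldl_map]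
  rw [pvFoldl_sum _ _ (fun j : Int => pvTerm word.toList j) 0
      (by
        intro acc j hj
        unfold pvTerm
        dsimp only []
        ring)]
  rw [zero_add]
  have hr : PySem.List.pyRange 0 (PySem.List.len word.toList) 1
      = (List.range word.toList.length).map (fun k : Nat => (k : Int)) := by
    rw [PySem.List.pyRange_one]
    simp [PySem.List.len]
  rw [hr, List.map_map]
  rfl

-- ===== VERDICT (by name: the statement is the Claim_ definition above) =====
theorem solution_spec : Claim_equal_solution := by
  intro word _ _
  unfold Spec_solution
  rw [pvA_eq_sum, pvB_eq_sum]
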